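-- pv_equiv track=rewrite | github.com/DevUt/CP | CF/random-problems/CThePhoneNumberSplit.py | min_k
-- ===== SOURCE A (Python) =====
-- def min_k(n) :
--     expr = int(1e9)
--     min_i = int(1e9)
--     for i in range(1,n) :
--         tmp_expr = i + n//i + int(n%i != 0)
--         if expr > tmp_expr :
--             expr = tmp_expr
--             min_i = i
--     return min_i, n//min_i , expr
-- ===== SOURCE B (Python) =====
-- def min_k(n):
--     # O(sqrt(n)): the first minimizer of i + ceil(n/i) always lies below isqrt(n)+2,
--     # so scan only that prefix of the range.
--     expr = 10 ** 9
--     min_i = 10 ** 9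
--     s = 1
--     while (s + 1) * (s + 1) <= n:
--         s += 1
--     i = 1
--     while i < min(n, s + 2):
--         tmp = i + n // i + (n % i != 0)
--         if tmp < expr:
--             expr = tmp
--             min_i = i
--         i += 1
--     return min_i, n // min_i, expr
-- ===== Notes on version B (the rewrite author's own statement) =====
-- stated objective: faster
-- what changed: B first computes the integer square root s of n with a small while loop and scans only the candidates below min(n, s plus two), where the first minimizer of i + ceil(n/i) provably lies, instead of A's scan of the whole range up to n.
import Mathlib
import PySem

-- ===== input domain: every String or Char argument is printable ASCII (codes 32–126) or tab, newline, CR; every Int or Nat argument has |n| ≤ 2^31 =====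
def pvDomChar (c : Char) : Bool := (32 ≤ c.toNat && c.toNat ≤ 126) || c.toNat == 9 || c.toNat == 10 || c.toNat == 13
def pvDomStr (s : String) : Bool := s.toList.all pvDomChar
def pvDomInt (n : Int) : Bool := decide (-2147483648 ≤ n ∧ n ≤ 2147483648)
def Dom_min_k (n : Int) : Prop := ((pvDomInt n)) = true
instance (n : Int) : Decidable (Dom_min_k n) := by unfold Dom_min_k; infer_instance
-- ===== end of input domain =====

-- B replaces A's O(n) scan of range(1,n) by an O(sqrt(n)) scan up to isqrt(n)+2, where the first minimizer provably lies.

-- shared cost expression: i + n//i + int(n%i != 0)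
def pvF (n i : Int) : Int :=
  i + PySem.Int.floordiv n i + (if PySem.Int.mod n i ≠ 0 then 1 else 0)

-- ===== PORT A =====
-- loop body of A: if expr > tmp_expr: expr, min_i = tmp_expr, i
def pvStepA (n : Int) (st : Int × Int) (i : Int) : Int × Int :=
  let tmp_expr := pvF n i
  if st.1 > tmp_expr then (tmp_expr, i) else st

def min_k (n : Int) : List Int :=
  let st := (PySem.List.pyRange 1 n 1).foldl (pvStepA n) ((10 ^ 9 : Int), (10 ^ 9 : Int))
  [st.2, PySem.Int.floordiv n st.2, st.1]

-- ===== PORT B =====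
-- termination measures of B's two while loops (cited by name to keep the definitions small)
lemma pvIsqrt_dec (n s : Int) (h : (s + 1) * (s + 1) ≤ n) :
    (n - (s + 1)).toNat < (n - s).toNat := by
  have hx : s + 1 ≤ (s + 1) * (s + 1) := by nlinarith [mul_self_nonneg s]
  omega

lemma pvLoopB_dec (hi i : Int) (h : i < hi) : (hi - (i + 1)).toNat < (hi - i).toNat := by
  omega

-- while (s+1)*(s+1) <= n: s += 1
def pvIsqrt (n s : Int) : Int :=
  if h : (s + 1) * (s + 1) ≤ n then pvIsqrt n (s + 1) else s
termination_by (n - s).toNat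
decreasing_by exact pvIsqrt_dec n s h

-- while i < hi: update (expr, min_i); i += 1
def pvLoopB (n hi i expr min_i : Int) : Int × Int :=
  if h : i < hi then
    let tmp := pvF n i
    if tmp < expr then pvLoopB n hi (i + 1) tmp i
    else pvLoopB n hi (i + 1) expr min_i
  else (expr, min_i)
termination_by (hi - i).toNat
decreasing_by all_goals exact pvLoopB_dec hi i h

def min_k_alt (n : Int) : List Int :=
  let s := pvIsqrt n 1
  let st := pvLoopB n (min n (s + 2)) 1 (10 ^ 9) (10 ^ 9)
  [st.2, PySem.Int.floordiv n st.2, st.1]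

-- ===== PRECONDITION & SPEC =====
def Spec_min_k (n : Int) (out : List Int) : Prop := out = min_k_alt n
instance (n : Int) (out : List Int) : Decidable (Spec_min_k n out) := by unfold Spec_min_k; infer_instance

-- ===== CLAIM (what is proved, stated in full; the proofs are below) =====
def Claim_equal_min_k : Prop := ∀ (n : Int), Dom_min_k n → Spec_min_k n (min_k n)

-- ===== LEMMAS AND PROOFS =====

-- B's while loop is the fold of A's step over the same (shorter) range
lemma loopB_eq_foldl_aux (n : Int) (k : Nat) : ∀ (hi i e m : Int), (hi - i).toNat ≤ k →
    pvLoopB n hi i e m = (PySem.List.pyRange i hi 1).foldl (pvStepA n) (e, m) := by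
  induction k with
  | zero =>
    intro hi i e m hk
    have h : ¬ i < hi := by omega
    rw [pvLoopB, PySem.List.pyRange_one_eq_nil (by omega)]
    simp [h]
  | succ k ih =>
    intro hi i e m hk
    by_cases h : i < hi
    · rw [pvLoopB, PySem.List.pyRange_one_cons h]
      simp only [h, dif_pos, List.foldl_cons]
      have step : pvStepA n (e, m) i = if pvF n i < e then (pvF n i, i) else (e, m) := by
        simp [pvStepA, gt_iff_lt]
      rw [step]
      by_cases hc : pvF n i < e
      · simp only [if_pos hc]
        rw [ih hi (i + 1) _ _ (by omega)]
      · simp only [if_neg hc]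
        rw [ih hi (i + 1) _ _ (by omega)]
    · rw [pvLoopB, PySem.List.pyRange_one_eq_nil (by omega)]
      simp [h]

lemma loopB_eq_foldl (n hi i e m : Int) :
    pvLoopB n hi i e m = (PySem.List.pyRange i hi 1).foldl (pvStepA n) (e, m) :=
  loopB_eq_foldl_aux n (hi - i).toNat hi i e m le_rfl

-- the expr component of one step never increases
lemma stepA_fst_le (n : Int) (st : Int × Int) (a : Int) : (pvStepA n st a).1 ≤ st.1 := by
  simp only [pvStepA, gt_iff_lt]
  split
  · next hlt => exact le_of_lt hlt
  · exact le_refl _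

-- the expr component of the fold never increases
lemma foldl_fst_le_init (n : Int) (l : List Int) (st : Int × Int) :
    ((l.foldl (pvStepA n) st)).1 ≤ st.1 := by
  induction l generalizing st with
  | nil => exact le_refl _
  | cons a l ih =>
    simp only [List.foldl_cons]
    exact le_trans (ih _) (stepA_fst_le n st a)

-- the expr component is ≤ pvF n j for every visited j
lemma foldl_fst_le_mem (n : Int) (l : List Int) : ∀ (st : Int × Int) (j : Int), j ∈ l →
    ((l.foldl (pvStepA n) st)).1 ≤ pvF n j := by
  induction l with
  | nil => intro st j hj; cases hj
  | cons a l ih =>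
    intro st j hj
    simp only [List.foldl_cons]
    rcases List.mem_cons.mp hj with rfl | hj'
    · refine le_trans (foldl_fst_le_init n l _) ?_
      simp only [pvStepA, gt_iff_lt]
      split
      · exact le_refl _
      · next hnot => exact not_lt.mp hnot
    · exact ih _ j hj'

-- if no element can improve expr, the fold is the identity
lemma foldl_no_change (n : Int) (l : List Int) (st : Int × Int)
    (h : ∀ j ∈ l, st.1 ≤ pvF n j) : l.foldl (pvStepA n) st = st := by
  induction l with
  | nil => rfl
  | cons a l ih =>
    have ha := h a (by simp)
    have hstep : pvStepA n st a = st := by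
      simp only [pvStepA, gt_iff_lt]
      rw [if_neg (not_lt.mpr ha)]
    simp only [List.foldl_cons, hstep]
    exact ih (fun j hj => h j (List.mem_cons_of_mem a hj))

lemma isqrt_aux (n : Int) (k : Nat) : ∀ s : Int, (n - s).toNat ≤ k →
    s ≤ pvIsqrt n s ∧ n < (pvIsqrt n s + 1) * (pvIsqrt n s + 1) := by
  induction k with
  | zero =>
    intro s hk
    rw [pvIsqrt]
    by_cases h : (s + 1) * (s + 1) ≤ n
    · have hx : s + 1 ≤ (s + 1) * (s + 1) := by nlinarith [mul_self_nonneg s]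
      omega
    · simp only [h, dif_neg, not_false_iff]
      exact ⟨le_refl s, not_le.mp h⟩
  | succ k ih =>
    intro s hk
    rw [pvIsqrt]
    by_cases h : (s + 1) * (s + 1) ≤ n
    · simp only [h, dif_pos]
      have hx : s + 1 ≤ (s + 1) * (s + 1) := by nlinarith [mul_self_nonneg s]
      obtain ⟨h1, h2⟩ := ih (s + 1) (by omega)
      exact ⟨by omega, h2⟩
    · simp only [h, dif_neg, not_false_iff]
      exact ⟨le_refl s, not_le.mp h⟩

lemma isqrt_ge (n s : Int) : s ≤ pvIsqrt n s :=
  (isqrt_aux n (n - s).toNat s le_rfl).1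

lemma isqrt_ub (n s : Int) : n < (pvIsqrt n s + 1) * (pvIsqrt n s + 1) :=
  (isqrt_aux n (n - s).toNat s le_rfl).2

-- ceil(n/j) ≤ i whenever n ≤ j * i
lemma ceil_le (n j i : Int) (hjpos : 0 < j) (hnji : n ≤ j * i) :
    PySem.Int.floordiv n j + (if PySem.Int.mod n j ≠ 0 then (1 : Int) else 0) ≤ i := by
  have hqr := PySem.Int.floordiv_mul_add_mod n j
  have hr0 := PySem.Int.mod_nonneg n hjpos
  have hrj := PySem.Int.mod_lt n hjpos
  have hcomm : j * i = i * j := by ring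
  by_cases h0 : PySem.Int.mod n j = 0
  · simp only [h0, ne_eq, not_true_eq_false, if_false, add_zero]
    have h1 : PySem.Int.floordiv n j * j ≤ i * j := by linarith
    exact le_of_mul_le_mul_right h1 hjpos
  · have hrpos : 0 < PySem.Int.mod n j := lt_of_le_of_ne hr0 (Ne.symm h0)
    simp only [h0, ne_eq, not_false_iff, if_true]
    have h1 : PySem.Int.floordiv n j * j < i * j := by linarith
    have h2 := lt_of_mul_lt_mul_right h1 (le_of_lt hjpos)
    omega

-- for i beyond isqrt(n)+1, j = ceil(n/i) is earlier and has cost ≤ cost of i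
lemma key_lemma (n s i : Int) (hs : 1 ≤ s) (hub : n < (s + 1) * (s + 1))
    (hi2 : s + 2 ≤ i) (hin : i < n) :
    ∃ j, 1 ≤ j ∧ j < s + 2 ∧ pvF n j ≤ pvF n i := by
  have hipos : (0 : Int) < i := by omega
  have hqr := PySem.Int.floordiv_mul_add_mod n i
  have hr0 := PySem.Int.mod_nonneg n hipos
  have hri := PySem.Int.mod_lt n hipos
  set q := PySem.Int.floordiv n i with hq
  set r := PySem.Int.mod n i with hr
  set c : Int := if r ≠ 0 then (1 : Int) else 0 with hc
  have hq1 : 1 ≤ q := by nlinarith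
  have hfi : pvF n i = i + q + c := by rw [pvF]
  -- bracket facts for j = q + c
  have hlow : (q + c - 1) * i < n := by
    by_cases h0 : r = 0
    · have hc0 : c = 0 := by rw [hc]; simp [h0]
      have he : (q + c - 1) * i = q * i - i := by rw [hc0]; ring
      rw [h0] at hqr
      linarith
    · have hc1 : c = 1 := by rw [hc]; simp [h0]
      have hrpos : 0 < r := lt_of_le_of_ne hr0 (Ne.symm h0)
      have he : (q + c - 1) * i = q * i := by rw [hc1]; ring
      linarith
  have hnji : n ≤ (q + c) * i := by
    by_cases h0 : r = 0
    · have hc0 : c = 0 := by rw [hc]; simp [h0]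
      have he : (q + c) * i = q * i := by rw [hc0]; ring
      rw [h0] at hqr
      linarith
    · have hc1 : c = 1 := by rw [hc]; simp [h0]
      have he : (q + c) * i = q * i + i := by rw [hc1]; ring
      linarith
  have hc01 : 0 ≤ c ∧ c ≤ 1 := by rw [hc]; split <;> omega
  have hjlt : q + c < s + 2 := by
    have h5 := mul_le_mul_of_nonneg_left hi2 (by omega : (0 : Int) ≤ s + 1)
    have h6 : (s + 1) * (s + 2) = (s + 1) * (s + 1) + (s + 1) := by ring
    have h2 : n < (s + 1) * i := by linarith
    have h3 : (q + c - 1) * i < (s + 1) * i := lt_trans hlow h2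
    have h4 := lt_of_mul_lt_mul_right h3 (le_of_lt hipos)
    omega
  have hjpos : (0 : Int) < q + c := by omega
  refine ⟨q + c, by omega, hjlt, ?_⟩
  have hceil := ceil_le n (q + c) i hjpos hnji
  rw [hfi, pvF]
  omega

lemma states_eq (n : Int) :
    (PySem.List.pyRange 1 n 1).foldl (pvStepA n) ((10 ^ 9 : Int), (10 ^ 9 : Int)) =
    pvLoopB n (min n (pvIsqrt n 1 + 2)) 1 (10 ^ 9) (10 ^ 9) := by
  rw [loopB_eq_foldl]
  by_cases h : n ≤ pvIsqrt n 1 + 2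
  · rw [min_eq_left h]
  · have hub := isqrt_ub n 1
    have hge := isqrt_ge n 1
    set s := pvIsqrt n 1 with hs
    rw [min_eq_right (by omega)]
    rw [PySem.List.pyRange_one_append 1 (s + 2) n (by omega) (by omega), List.foldl_append]
    rw [foldl_no_change]
    intro jj hjj
    rw [PySem.List.mem_pyRange_one] at hjj
    obtain ⟨j, hj1, hj2, hjle⟩ := key_lemma n s jj hge hub hjj.1 hjj.2
    have hmem : j ∈ PySem.List.pyRange 1 (s + 2) 1 := by
      rw [PySem.List.mem_pyRange_one]; omega
    have := foldl_fst_le_mem n (PySem.List.pyRange 1 (s + 2) 1)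
      ((10 ^ 9 : Int), (10 ^ 9 : Int)) j hmem
    linarith

-- ===== VERDICT (by name: the statement is the Claim_ definition above) =====
theorem min_k_spec : Claim_equal_min_k := by
  intro n _
  unfold Spec_min_k
  simp only [min_k, min_k_alt]
  rw [states_eq n]
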